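-- pv_equiv track=rewrite | github.com/chadhellkerley-code/chatbot1 | whatsapp.py | _summarize_contacts
-- ===== SOURCE A (Python) =====
-- from typing import Any, Iterable, Iterator
--
-- def _summarize_contacts(contacts: Iterable[dict[str, Any]]) -> dict[str, int]:
--     summary = {
--         "Total": 0,
--         "Mensaje enviado": 0,
--         "En espera": 0,
--         "Respondió": 0,
--         "Pagó": 0,
--         "Acceso enviado": 0,
--     }
--     for contact in contacts:
--         summary["Total"] += 1
--         status = (contact.get("status") or "").lower()
--         if "seguimiento" in status or "sin" in status:
--             summary["En espera"] += 1
--         if "mensaje" in status: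
--             summary["Mensaje enviado"] += 1
--         if "respond" in status:
--             summary["Respondió"] += 1
--         if "pag" in status:
--             summary["Pagó"] += 1
--         if "acceso" in status:
--             summary["Acceso enviado"] += 1
--     return summary
-- ===== SOURCE B (Python) =====
-- def _summarize_contacts(contacts):
--     items = list(contacts)
--
--     def st(c):
--         return (c.get("status") or "").lower()
--
--     return {
--         "Total": len(items),
--         "Mensaje enviado": sum(1 for c in items if "mensaje" in st(c)),
--         "En espera": sum(1 for c in items if "seguimiento" in st(c) or "sin" in st(c)),
--         "Respondió": sum(1 for c in items if "respond" in st(c)),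
--         "Pagó": sum(1 for c in items if "pag" in st(c)),
--         "Acceso enviado": sum(1 for c in items if "acceso" in st(c)),
--     }
-- ===== Notes on version B (the rewrite author's own statement) =====
-- stated objective: idiomatic
-- what changed: Replaces the single accumulating loop over a mutable counter dict with one independent comprehension-sum per category (after snapshotting the iterable once), assembling the result dict in one expression.
import Mathlib
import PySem

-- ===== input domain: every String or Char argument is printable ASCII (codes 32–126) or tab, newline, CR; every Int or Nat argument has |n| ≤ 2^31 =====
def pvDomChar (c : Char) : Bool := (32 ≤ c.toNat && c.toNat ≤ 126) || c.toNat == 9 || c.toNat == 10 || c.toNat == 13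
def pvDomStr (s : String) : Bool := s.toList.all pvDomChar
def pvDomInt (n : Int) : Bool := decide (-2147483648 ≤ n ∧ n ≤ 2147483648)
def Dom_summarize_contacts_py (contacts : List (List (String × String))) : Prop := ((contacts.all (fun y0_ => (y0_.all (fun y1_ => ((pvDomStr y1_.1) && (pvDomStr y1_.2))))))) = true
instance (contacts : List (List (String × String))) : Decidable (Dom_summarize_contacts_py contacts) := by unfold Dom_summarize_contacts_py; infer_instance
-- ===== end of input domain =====

-- B replaces A's single accumulating loop over a mutable counter dict with one independent
-- count per category over the snapshotted list (idiomatic decomposition; same O(n) cost).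


-- ===== PORT A =====
-- Python truthiness of `x or ""` for Optional[str] x: None or "" -> "", nonempty stays
def pvAOrEmpty (o : Option String) : String :=
  match o with
  | some s => if s = "" then "" else s
  | none => ""

-- status = (contact.get("status") or "").lower()
def pvAStatus (contact : List (String × String)) : String :=
  PySem.Str.lower (pvAOrEmpty ((PySem.Dict.mk contact).get? "status"))

-- one iteration of A's for-loop; summary[k] += 1 is modify with default 0 (all keys are
-- pre-seeded, so the default is never used and this matches Python's KeyError-free += exactly)
def pvAStep (d : PySem.Dict String Int) (contact : List (String × String)) : PySem.Dict String Int :=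
  let d := d.modify "Total" 0 (· + 1)
  let status := pvAStatus contact
  let d := if PySem.Str.isIn "seguimiento" status || PySem.Str.isIn "sin" status then d.modify "En espera" 0 (· + 1) else d
  let d := if PySem.Str.isIn "mensaje" status then d.modify "Mensaje enviado" 0 (· + 1) else d
  let d := if PySem.Str.isIn "respond" status then d.modify "Respondió" 0 (· + 1) else d
  let d := if PySem.Str.isIn "pag" status then d.modify "Pagó" 0 (· + 1) else d
  let d := if PySem.Str.isIn "acceso" status then d.modify "Acceso enviado" 0 (· + 1) else d
  d

def summarize_contacts_py (contacts : List (List (String × String))) : List (String × Int) :=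
  (contacts.foldl pvAStep
    (PySem.Dict.ofList [("Total", 0), ("Mensaje enviado", 0), ("En espera", 0),
                        ("Respondió", 0), ("Pagó", 0), ("Acceso enviado", 0)])).items

-- ===== PORT B =====
-- st(c) = (c.get("status") or "").lower()
def pvBSt (c : List (String × String)) : String :=
  PySem.Str.lower (match (PySem.Dict.mk c).get? "status" with
                   | some s => if s = "" then "" else s
                   | none => "")

-- each category is its own pass: sum(1 for c in items if …) = countP
def summarize_contacts_py_alt (contacts : List (List (String × String))) : List (String × Int) :=
  [("Total", (contacts.length : Int)),
   ("Mensaje enviado", (contacts.countP (fun c => PySem.Str.isIn "mensaje" (pvBSt c)) : Int)),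
   ("En espera", (contacts.countP (fun c => PySem.Str.isIn "seguimiento" (pvBSt c) || PySem.Str.isIn "sin" (pvBSt c)) : Int)),
   ("Respondió", (contacts.countP (fun c => PySem.Str.isIn "respond" (pvBSt c)) : Int)),
   ("Pagó", (contacts.countP (fun c => PySem.Str.isIn "pag" (pvBSt c)) : Int)),
   ("Acceso enviado", (contacts.countP (fun c => PySem.Str.isIn "acceso" (pvBSt c)) : Int))]

-- ===== PRECONDITION & SPEC =====
def Spec_summarize_contacts_py (contacts : List (List (String × String))) (out : List (String × Int)) : Prop := out = summarize_contacts_py_alt contacts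
instance (contacts : List (List (String × String))) (out : List (String × Int)) : Decidable (Spec_summarize_contacts_py contacts out) := by unfold Spec_summarize_contacts_py; infer_instance

-- ===== CLAIM (what is proved, stated in full; the proofs are below) =====
def Claim_equal_summarize_contacts_py : Prop := ∀ (contacts : List (List (String × String))), Dom_summarize_contacts_py contacts → Spec_summarize_contacts_py contacts (summarize_contacts_py contacts)

-- ===== LEMMAS AND PROOFS =====

lemma pvBSt_eq_pvAStatus (c : List (String × String)) : pvBSt c = pvAStatus c := by
  simp [pvBSt, pvAStatus, pvAOrEmpty]

set_option maxHeartbeats 2000000 in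
lemma pvFold_items (l : List (List (String × String))) (t m e r p a : Int) :
    (l.foldl pvAStep
      (PySem.Dict.mk [("Total", t), ("Mensaje enviado", m), ("En espera", e),
                      ("Respondió", r), ("Pagó", p), ("Acceso enviado", a)])).items
    = [("Total", t + l.length),
       ("Mensaje enviado", m + l.countP (fun c => PySem.Str.isIn "mensaje" (pvAStatus c))),
       ("En espera", e + l.countP (fun c => PySem.Str.isIn "seguimiento" (pvAStatus c) || PySem.Str.isIn "sin" (pvAStatus c))),
       ("Respondió", r + l.countP (fun c => PySem.Str.isIn "respond" (pvAStatus c))),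
       ("Pagó", p + l.countP (fun c => PySem.Str.isIn "pag" (pvAStatus c))),
       ("Acceso enviado", a + l.countP (fun c => PySem.Str.isIn "acceso" (pvAStatus c)))] := by
  induction l generalizing t m e r p a with
  | nil => simp
  | cons c l ih =>
    simp only [List.foldl_cons]
    have hstep : pvAStep
        (PySem.Dict.mk [("Total", t), ("Mensaje enviado", m), ("En espera", e),
                        ("Respondió", r), ("Pagó", p), ("Acceso enviado", a)]) c
      = PySem.Dict.mk [("Total", t + 1),
          ("Mensaje enviado", if PySem.Str.isIn "mensaje" (pvAStatus c) then m + 1 else m),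
          ("En espera", if PySem.Str.isIn "seguimiento" (pvAStatus c) || PySem.Str.isIn "sin" (pvAStatus c) then e + 1 else e),
          ("Respondió", if PySem.Str.isIn "respond" (pvAStatus c) then r + 1 else r),
          ("Pagó", if PySem.Str.isIn "pag" (pvAStatus c) then p + 1 else p),
          ("Acceso enviado", if PySem.Str.isIn "acceso" (pvAStatus c) then a + 1 else a)] := by
      simp only [pvAStep]
      split_ifs <;> simp [PySem.Dict.modify, PySem.Dict.getD, PySem.Dict.get?, PySem.Dict.insert, PySem.Dict.contains]
    rw [hstep, ih]
    simp only [List.countP_cons, List.length_cons]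
    split_ifs <;> simp <;> omega

-- ===== VERDICT (by name: the statement is the Claim_ definition above) =====
theorem summarize_contacts_py_spec : Claim_equal_summarize_contacts_py := by
  intro contacts _
  show summarize_contacts_py contacts = summarize_contacts_py_alt contacts
  unfold summarize_contacts_py summarize_contacts_py_alt
  have h0 : PySem.Dict.ofList ([("Total", (0:Int)), ("Mensaje enviado", 0), ("En espera", 0),
      ("Respondió", 0), ("Pagó", 0), ("Acceso enviado", 0)])
    = PySem.Dict.mk [("Total", 0), ("Mensaje enviado", 0), ("En espera", 0),
                     ("Respondió", 0), ("Pagó", 0), ("Acceso enviado", 0)] := by decide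
  rw [h0, pvFold_items]
  simp [pvBSt_eq_pvAStatus]
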